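-- pv_equiv track=rewrite | github.com/Bsh13lder/Lazy-Claw | lazyclaw/skills/builtin/task_manager.py | _fuzzy_match_task
-- ===== SOURCE A (Python) =====
-- def _fuzzy_match_task(tasks: list[dict], name: str) -> dict | None:
--     """Find a task by fuzzy name matching."""
--     name_lower = name.lower().strip()
--     # Exact match first
--     for t in tasks:
--         if (t.get("title") or "").lower() == name_lower:
--             return t
--     # Contains match
--     for t in tasks:
--         title = (t.get("title") or "").lower()
--         if name_lower in title or title in name_lower:
--             return t
--     return None
-- ===== SOURCE B (Python) =====
-- def _fuzzy_match_task(tasks: list[dict], name: str) -> dict | None: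
--     """Find a task by fuzzy name matching (single pass: exact match short-circuits,
--     first contains-match is carried as a candidate)."""
--     name_lower = name.lower().strip()
--     candidate = None
--     for t in tasks:
--         title = (t.get("title") or "").lower()
--         if title == name_lower:
--             return t
--         if candidate is None and (name_lower in title or title in name_lower):
--             candidate = t
--     return candidate
-- ===== Notes on version B (the rewrite author's own statement) =====
-- stated objective: alternative
-- what changed: Replaces A's two ordered passes over tasks (exact-match scan, then contains-match scan) with a single pass that returns immediately on an exact match and carries the first contains-match as a candidate returned at the end.
import Mathlib
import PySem

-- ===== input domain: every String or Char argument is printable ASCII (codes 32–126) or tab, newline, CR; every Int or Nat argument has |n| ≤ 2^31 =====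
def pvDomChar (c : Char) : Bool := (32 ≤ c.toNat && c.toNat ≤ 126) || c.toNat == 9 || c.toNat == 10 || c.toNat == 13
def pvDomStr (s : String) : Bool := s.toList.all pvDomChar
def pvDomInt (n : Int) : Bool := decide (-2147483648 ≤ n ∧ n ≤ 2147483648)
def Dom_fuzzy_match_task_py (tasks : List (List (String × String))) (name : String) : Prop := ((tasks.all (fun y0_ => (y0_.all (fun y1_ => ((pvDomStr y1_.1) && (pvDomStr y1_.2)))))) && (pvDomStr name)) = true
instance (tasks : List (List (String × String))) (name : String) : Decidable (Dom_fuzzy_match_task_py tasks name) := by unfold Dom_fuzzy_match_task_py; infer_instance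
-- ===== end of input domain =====

-- B does one pass carrying the first contains-match as a candidate, instead of A's two ordered passes; same return value.
-- ===== PORT A =====
-- (t.get("title") or "").lower(): a missing or falsy (empty) title becomes "".
def pvTitleLower (t : List (String × String)) : String :=
  PySem.Str.lower (match PySem.Dict.get? (PySem.Dict.mk t) "title" with
    | some s => if s == "" then "" else s
    | none => "")

-- first pass: exact match
def pvFindExact (nl : String) : List (List (String × String)) → Option (List (String × String))
  | [] => none
  | t :: ts => if pvTitleLower t == nl then some t else pvFindExact nl ts

-- second pass: contains match (symmetric substring test)
def pvFindContains (nl : String) : List (List (String × String)) → Option (List (String × String))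
  | [] => none
  | t :: ts =>
    let title := pvTitleLower t
    if PySem.Str.isIn nl title || PySem.Str.isIn title nl then some t else pvFindContains nl ts

def fuzzy_match_task_py (tasks : List (List (String × String))) (name : String) : Option (List (String × String)) :=
  let name_lower := PySem.Str.strip (PySem.Str.lower name)
  match pvFindExact name_lower tasks with
  | some t => some t
  | none => pvFindContains name_lower tasks

-- ===== PORT B =====
-- single pass with the saved candidate as loop state
def pvAltGo (nl : String) (cand : Option (List (String × String))) :
    List (List (String × String)) → Option (List (String × String))
  | [] => cand
  | t :: ts =>
    let title := pvTitleLower t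
    if title == nl then some t
    else if cand.isNone && (PySem.Str.isIn nl title || PySem.Str.isIn title nl) then
      pvAltGo nl (some t) ts
    else pvAltGo nl cand ts

def fuzzy_match_task_py_alt (tasks : List (List (String × String))) (name : String) : Option (List (String × String)) :=
  pvAltGo (PySem.Str.strip (PySem.Str.lower name)) none tasks

-- ===== PRECONDITION & SPEC =====
def Spec_fuzzy_match_task_py (tasks : List (List (String × String))) (name : String) (out : Option (List (String × String))) : Prop := out = fuzzy_match_task_py_alt tasks name
instance (tasks : List (List (String × String))) (name : String) (out : Option (List (String × String))) : Decidable (Spec_fuzzy_match_task_py tasks name out) := by unfold Spec_fuzzy_match_task_py; infer_instance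

-- ===== CLAIM (what is proved, stated in full; the proofs are below) =====
def Claim_equal_fuzzy_match_task_py : Prop := ∀ (tasks : List (List (String × String))) (name : String), Dom_fuzzy_match_task_py tasks name → Spec_fuzzy_match_task_py tasks name (fuzzy_match_task_py tasks name)

-- ===== LEMMAS AND PROOFS =====
-- The one-pass loop equals: first exact match, else the saved candidate, else the first contains match.
theorem pvAltGo_eq (nl : String) (tasks : List (List (String × String)))
    (cand : Option (List (String × String))) :
    pvAltGo nl cand tasks = (pvFindExact nl tasks).or (cand.or (pvFindContains nl tasks)) := by
  induction tasks generalizing cand with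
  | nil => cases cand <;> rfl
  | cons t ts ih =>
    simp only [pvAltGo, pvFindExact, pvFindContains]
    by_cases he : pvTitleLower t == nl
    · simp [he]
    · simp only [he, if_false, Bool.false_eq_true]
      cases cand with
      | some c => simp [ih]
      | none =>
        simp only [ih]
        cases pvFindExact nl ts <;> simp [Option.or]

-- ===== VERDICT (by name: the statement is the Claim_ definition above) =====
theorem fuzzy_match_task_py_spec : Claim_equal_fuzzy_match_task_py := by
  intro tasks name _
  unfold Spec_fuzzy_match_task_py fuzzy_match_task_py fuzzy_match_task_py_alt
  rw [pvAltGo_eq]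
  cases h : pvFindExact (PySem.Str.strip (PySem.Str.lower name)) tasks <;> simp [Option.or, h]
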